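-- pv_equiv track=rewrite | github.com/36-750/documents | Activities/cows/cows1.py | cow_proximity_l
-- ===== SOURCE A (Python) =====
-- def cow_proximity_l(breed_ids, threshold):
--     biggest = -1
--     seen = {}
--
--     for index, breed in enumerate(breed_ids):
--         if breed > biggest:
--             if breed in seen:
--                 if index - seen[breed] <= threshold:
--                     biggest = breed
--                     del seen[breed]
--                 else:
--                     seen[breed] = index
--             else:
--                 seen[breed] = index
--     return biggest
-- ===== SOURCE B (Python) =====
-- def cow_proximity_l(breed_ids, threshold):
--     best = -1
--     for i, b in enumerate(breed_ids):
--         if b > best and b in breed_ids[max(0, i - threshold):i]: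
--             best = b
--     return best
-- ===== Notes on version B (the rewrite author's own statement) =====
-- stated objective: simpler
-- what changed: Replaced A's dict-of-last-seen-index state machine (membership test, threshold comparison, delete/update of the dict) by a single pass that keeps only the running best and tests whether the current breed occurs in the sliding window breed_ids[max(0, i-threshold):i].
import Mathlib
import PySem

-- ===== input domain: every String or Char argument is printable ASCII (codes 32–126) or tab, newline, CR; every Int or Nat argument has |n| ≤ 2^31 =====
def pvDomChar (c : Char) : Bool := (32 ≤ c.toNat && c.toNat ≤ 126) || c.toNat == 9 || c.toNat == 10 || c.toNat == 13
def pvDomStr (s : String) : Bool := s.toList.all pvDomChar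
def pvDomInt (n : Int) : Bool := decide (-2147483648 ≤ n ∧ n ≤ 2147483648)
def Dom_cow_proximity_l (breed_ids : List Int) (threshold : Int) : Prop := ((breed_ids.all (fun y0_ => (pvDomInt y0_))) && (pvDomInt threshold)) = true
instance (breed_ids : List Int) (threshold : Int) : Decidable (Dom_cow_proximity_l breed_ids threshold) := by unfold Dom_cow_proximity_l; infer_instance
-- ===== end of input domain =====

-- B replaces A's dict-of-last-seen state machine by a single pass that tests membership of the
-- current breed in the sliding window breed_ids[max(0, i-threshold):i] — simpler, no dict.

-- ===== PORT A =====
-- loop body of A: state is (biggest, seen)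
def cowStepA (threshold : Int) (st : Int × PySem.Dict Int Int) (ib : Int × Int) : Int × PySem.Dict Int Int :=
  if ib.2 > st.1 then
    match st.2.get? ib.2 with
    | some j => if ib.1 - j ≤ threshold then (ib.2, st.2.erase ib.2)
                else (st.1, st.2.insert ib.2 ib.1)
    | none => (st.1, st.2.insert ib.2 ib.1)
  else st

def cow_proximity_l (breed_ids : List Int) (threshold : Int) : Int :=
  ((PySem.List.enumerate breed_ids 0).foldl (cowStepA threshold) (-1, PySem.Dict.empty)).1

-- ===== PORT B =====
-- loop body of B: 'if b > best and b in breed_ids[max(0, i - threshold):i]: best = b'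
def cowStepB (breed_ids : List Int) (threshold : Int) (best : Int) (ib : Int × Int) : Int :=
  if ib.2 > best ∧ (PySem.List.slice breed_ids (some (max 0 (ib.1 - threshold))) (some ib.1)).contains ib.2
  then ib.2 else best

def cow_proximity_l_alt (breed_ids : List Int) (threshold : Int) : Int :=
  (PySem.List.enumerate breed_ids 0).foldl (cowStepB breed_ids threshold) (-1)

-- ===== PRECONDITION & SPEC =====
def Spec_cow_proximity_l (breed_ids : List Int) (threshold : Int) (out : Int) : Prop := out = cow_proximity_l_alt breed_ids threshold
instance (breed_ids : List Int) (threshold : Int) (out : Int) : Decidable (Spec_cow_proximity_l breed_ids threshold out) := by unfold Spec_cow_proximity_l; infer_instance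

-- ===== CLAIM (what is proved, stated in full; the proofs are below) =====
def Claim_equal_cow_proximity_l : Prop := ∀ (breed_ids : List Int) (threshold : Int), Dom_cow_proximity_l breed_ids threshold → Spec_cow_proximity_l breed_ids threshold (cow_proximity_l breed_ids threshold)

-- ===== LEMMAS AND PROOFS =====

-- index of the last occurrence of b in p (proof-side helper)
def lastOcc? : List Int → Int → Option Nat
  | [], _ => none
  | x :: r, b =>
    match lastOcc? r b with
    | some j => some (j + 1)
    | none => if x = b then some 0 else none

theorem lastOcc?_append (p : List Int) (x b : Int) :
    lastOcc? (p ++ [x]) b = if x = b then some p.length else lastOcc? p b := by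
  induction p with
  | nil => rfl
  | cons y p ih =>
    simp only [List.cons_append, lastOcc?, ih, List.length_cons]
    split_ifs <;> simp

theorem lastOcc?_eq_none_iff (p : List Int) (b : Int) : lastOcc? p b = none ↔ b ∉ p := by
  induction p with
  | nil => simp [lastOcc?]
  | cons y p ih =>
    cases hr : lastOcc? p b with
    | some j =>
      have hb : b ∈ p := by
        by_contra hb
        rw [ih.mpr hb] at hr
        simp at hr
      simp [lastOcc?, hr, hb]
    | none =>
      have hb : b ∉ p := ih.mp hr
      simp only [lastOcc?, hr]
      split_ifs with hy
      · simp [hy, List.mem_cons]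
      · simp [List.mem_cons, hb, show ¬ b = y from fun h => hy h.symm]

theorem lastOcc?_spec (p : List Int) (b : Int) (j : Nat) (h : lastOcc? p b = some j) :
    ∃ (hj : j < p.length), p[j] = b ∧ ∀ k (hk : k < p.length), p[k] = b → k ≤ j := by
  induction p generalizing j with
  | nil => simp [lastOcc?] at h
  | cons y p ih =>
    simp only [lastOcc?] at h
    cases hr : lastOcc? p b with
    | some j' =>
      rw [hr] at h
      obtain rfl : j' + 1 = j := by simpa using h
      obtain ⟨hj', hget, hmax⟩ := ih j' hr
      refine ⟨by simpa using Nat.succ_lt_succ hj', by simpa using hget, ?_⟩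
      intro k hk hkb
      cases k with
      | zero => omega
      | succ k' =>
        have : k' ≤ j' := hmax k' (by simpa using hk) (by simpa using hkb)
        omega
    | none =>
      rw [hr] at h
      have hnb : b ∉ p := (lastOcc?_eq_none_iff p b).mp hr
      split_ifs at h with hy
      · obtain rfl : 0 = j := by simpa using h
        refine ⟨by simp, by simpa using hy, ?_⟩
        intro k hk hkb
        cases k with
        | zero => exact Nat.le_refl 0
        | succ k' =>
          have hk1 : k' < p.length := by simpa using hk
          have hb1 : p[k'] = b := by simpa using hkb
          exact absurd (hb1 ▸ List.getElem_mem hk1) hnb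

-- membership in a clamped drop/take window, as an indexed statement
theorem mem_drop_take (xs : List Int) (m n : Nat) (b : Int) :
    b ∈ (xs.drop m).take n ↔ ∃ j, m ≤ j ∧ j < m + n ∧ ∃ (h : j < xs.length), xs[j] = b := by
  constructor
  · intro hb
    obtain ⟨i, hi, hget⟩ := List.mem_iff_getElem.mp hb
    have hi' : i < n ∧ m + i < xs.length := by
      have := hi
      simp [List.length_take, List.length_drop] at this
      omega
    refine ⟨m + i, by omega, by omega, hi'.2, ?_⟩
    simpa [List.getElem_take, List.getElem_drop] using hget
  · rintro ⟨j, hmj, hjn, hlen, hget⟩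
    apply List.mem_iff_getElem.mpr
    refine ⟨j - m, by simp [List.length_take, List.length_drop]; omega, ?_⟩
    rw [List.getElem_take, List.getElem_drop]
    have : m + (j - m) = j := by omega
    simp [this, hget]

-- B's window test, characterised on the processed prefix p (xs = p ++ s, i = p.length)
theorem window_iff (p s : List Int) (t b : Int) :
    ((PySem.List.slice (p ++ s) (some (max 0 ((p.length : Int) - t))) (some (p.length : Int))).contains b = true)
    ↔ ∃ j, ∃ (hj : j < p.length), p[j] = b ∧ (p.length : Int) - (j : Int) ≤ t := by
  have h0 : (0 : Int) ≤ max 0 ((p.length : Int) - t) := le_max_left _ _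
  have h1 : (0 : Int) ≤ (p.length : Int) := Int.natCast_nonneg _
  rw [PySem.List.slice_toNat _ h0 h1]
  rw [List.contains_iff_mem, mem_drop_take]
  have hN : ((p.length : Int)).toNat = p.length := Int.toNat_natCast _
  set a : Int := max 0 ((p.length : Int) - t) with ha
  have ha0 : (0 : Int) ≤ a := le_max_left _ _
  have hale : (p.length : Int) - t ≤ a := le_max_right _ _
  have hchoice : a = 0 ∨ a = (p.length : Int) - t := max_choice _ _
  constructor
  · rintro ⟨j, hmj, hjn, hlen, hget⟩
    have hjp : j < p.length := by omega
    refine ⟨j, hjp, ?_, ?_⟩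
    · rw [← List.getElem_append_left (bs := s) hjp]; exact hget
    · omega
  · rintro ⟨j, hj, hget, hle⟩
    have hjs : j < (p ++ s).length := by simp; omega
    refine ⟨j, by omega, by omega, hjs, ?_⟩
    rw [List.getElem_append_left hj]; exact hget

-- find? is unaffected by filtering out a key it is not looking for
theorem find?_filter_ne (l : List (Int × Int)) (k k' : Int) (h : k' ≠ k) :
    List.find? (fun p => p.1 == k') (List.filter (fun p => !(p.1 == k)) l)
      = List.find? (fun p => p.1 == k') l := by
  induction l with
  | nil => rfl
  | cons a l ih =>
    by_cases hk : a.1 = k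
    · have h2 : (a.1 == k') = false := by
        simp only [beq_eq_false_iff_ne, ne_eq, hk]
        exact fun hh => h hh.symm
      rw [List.filter_cons, if_neg (by simp [hk]), List.find?_cons_of_neg (by simp [h2]), ih]
    · rw [List.filter_cons, if_pos (by simp [hk])]
      cases hk' : (a.1 == k') with
      | true => simp [hk']
      | false => simp [hk', ih]

-- erasing one key leaves every other key's binding unchanged
theorem get?_erase_of_ne (d : PySem.Dict Int Int) (k k' : Int) (h : k' ≠ k) :
    (d.erase k).get? k' = d.get? k' := by
  obtain ⟨l⟩ := d
  simp only [PySem.Dict.erase, PySem.Dict.get?]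
  rw [find?_filter_ne l k k' h]

-- the main loop invariant: A's (biggest, seen) and B's best agree step by step
theorem main_inv (t : Int) (xs : List Int) :
    ∀ (s p : List Int) (biggest : Int) (seen : PySem.Dict Int Int),
      xs = p ++ s →
      (∀ b : Int, biggest < b → seen.get? b = (lastOcc? p b).map (fun j => (j : Int))) →
      ((PySem.List.enumerate s (p.length : Int)).foldl (cowStepA t) (biggest, seen)).1
        = (PySem.List.enumerate s (p.length : Int)).foldl (cowStepB xs t) biggest := by
  intro s
  induction s with
  | nil => intro p biggest seen _ _; simp [PySem.List.enumerate_nil]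
  | cons c s' ih =>
    intro p biggest seen hxs hinv
    rw [PySem.List.enumerate_cons, List.foldl_cons, List.foldl_cons]
    have hlen : ((p.length : Int) + 1) = (((p ++ [c]).length : Int)) := by simp
    have hxs' : xs = (p ++ [c]) ++ s' := by simpa using hxs
    -- compute both step results
    by_cases hc : c > biggest
    · have hseen : seen.get? c = (lastOcc? p c).map (fun j => (j : Int)) := hinv c hc
      cases hlo : lastOcc? p c with
      | some j =>
        obtain ⟨hj, hget, hmax⟩ := lastOcc?_spec p c j hlo
        rw [hlo] at hseen
        by_cases hle : (p.length : Int) - (j : Int) ≤ t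
        · -- close pair: both become c
          have hA : cowStepA t (biggest, seen) ((p.length : Int), c) = (c, seen.erase c) := by
            simp [cowStepA, hc, hseen, hle]
          have hB : cowStepB xs t biggest ((p.length : Int), c) = c := by
            have hw : ((PySem.List.slice (p ++ c :: s') (some (max 0 ((p.length : Int) - t))) (some (p.length : Int))).contains c = true) :=
              (window_iff p (c :: s') t c).mpr ⟨j, hj, hget, hle⟩
            subst hxs
            simp only [List.contains_iff_mem] at hw
            simp [cowStepB, hc, hw]
          rw [hA, hB, hlen, ih (p ++ [c]) c (seen.erase c) hxs']
          intro b hb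
          rw [get?_erase_of_ne seen c b (by omega), hinv b (lt_trans hc hb),
              lastOcc?_append]
          simp [show ¬ c = b by omega]
        · -- far pair: A refreshes seen, B does nothing
          have hA : cowStepA t (biggest, seen) ((p.length : Int), c) = (biggest, seen.insert c (p.length : Int)) := by
            simp [cowStepA, hc, hseen, hle]
          have hB : cowStepB xs t biggest ((p.length : Int), c) = biggest := by
            have hw : ¬ ((PySem.List.slice (p ++ c :: s') (some (max 0 ((p.length : Int) - t))) (some (p.length : Int))).contains c = true) := by
              intro hmem
              obtain ⟨j', hj', hget', hle'⟩ := (window_iff p (c :: s') t c).mp hmem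
              have : j' ≤ j := hmax j' hj' hget'
              omega
            subst hxs
            simp only [List.contains_iff_mem] at hw
            simp [cowStepB, hw]
          rw [hA, hB, hlen, ih (p ++ [c]) biggest (seen.insert c (p.length : Int)) hxs']
          intro b hb
          by_cases hbc : b = c
          · subst hbc
            rw [PySem.Dict.get?_insert_self, lastOcc?_append]
            simp
          · rw [PySem.Dict.get?_insert_of_ne seen _ hbc, hinv b hb, lastOcc?_append]
            simp [show ¬ c = b from fun hh => hbc hh.symm]
      | none =>
        rw [hlo] at hseen
        have hnb : c ∉ p := (lastOcc?_eq_none_iff p c).mp hlo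
        have hA : cowStepA t (biggest, seen) ((p.length : Int), c) = (biggest, seen.insert c (p.length : Int)) := by
          simp [cowStepA, hc, hseen]
        have hB : cowStepB xs t biggest ((p.length : Int), c) = biggest := by
          have hw : ¬ ((PySem.List.slice (p ++ c :: s') (some (max 0 ((p.length : Int) - t))) (some (p.length : Int))).contains c = true) := by
            intro hmem
            obtain ⟨j', hj', hget', _⟩ := (window_iff p (c :: s') t c).mp hmem
            exact hnb (hget' ▸ List.getElem_mem hj')
          subst hxs
          simp only [List.contains_iff_mem] at hw
          simp [cowStepB, hw]
        rw [hA, hB, hlen, ih (p ++ [c]) biggest (seen.insert c (p.length : Int)) hxs']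
        intro b hb
        by_cases hbc : b = c
        · subst hbc
          rw [PySem.Dict.get?_insert_self, lastOcc?_append]
          simp
        · rw [PySem.Dict.get?_insert_of_ne seen _ hbc, hinv b hb, lastOcc?_append]
          simp [show ¬ c = b from fun hh => hbc hh.symm]
    · -- c ≤ biggest: both steps leave the state unchanged
      have hA : cowStepA t (biggest, seen) ((p.length : Int), c) = (biggest, seen) := by
        simp [cowStepA, hc]
      have hB : cowStepB xs t biggest ((p.length : Int), c) = biggest := by
        simp [cowStepB, hc]
      rw [hA, hB, hlen, ih (p ++ [c]) biggest seen hxs']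
      intro b hb
      rw [hinv b hb, lastOcc?_append]
      simp [show ¬ c = b by omega]

-- ===== VERDICT (by name: the statement is the Claim_ definition above) =====
theorem cow_proximity_l_spec : Claim_equal_cow_proximity_l := by
  intro breed_ids threshold _
  unfold Spec_cow_proximity_l cow_proximity_l cow_proximity_l_alt
  have h := main_inv threshold breed_ids breed_ids [] (-1) PySem.Dict.empty (by simp)
    (by intro b _; simp [lastOcc?, PySem.Dict.get?_empty])
  simpa using h
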